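-- pv_equiv track=rewrite | github.com/pypi-data/pypi-mirror-52 | packages/explorator/explorator-0.0.1-py3-none-any.whl/explorator/functions.py | filtered_string
-- ===== SOURCE A (Python) =====
-- def filtered_string(content, delete_words = []):
--     '''
--     params:
--         - content (str) : целевая строка
--         - delete_words (list of str) : подстроки, которые надо удалить из целевой строки
--     Эта функция делает следующие  преобразования со строкой:
--     - Удаляет пробелы по краям строки
--     - Удаляет подстроки из списка delete_words
--     - Удаляет пробелы подряд в строке, оставляя один
--
--     returns:
--         - content (str) : обработанная строка
--     '''
--
--     if content != float('nan'):
--         content = str(content)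
--         if delete_words:
--             for word in delete_words:
--                 content = content.replace(word, '')
--         content = content.strip()
--         tmp = ''
--         i = 0
--         while i < len(content):
--             if (i < len(content) - 1) and (content[i] + content[i+1] != '  '):
--                 tmp += content[i]
--             elif i == len(content) - 1:
--                 tmp += content[i]
--             i += 1
--         content = tmp
--     return content
-- ===== SOURCE B (Python) =====
-- def filtered_string(content, delete_words = []):
--     content = str(content)
--     for word in delete_words:
--         content = content.replace(word, '')
--     content = content.strip()
--     out = []
--     prev_space = False
--     for ch in content:
--         if ch == ' ':
--             if not prev_space:
--                 out.append(' ')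
--             prev_space = True
--         else:
--             out.append(ch)
--             prev_space = False
--     return ''.join(out)
-- ===== Notes on version B (the rewrite author's own statement) =====
-- stated objective: simpler
-- what changed: Replaces A's index/lookahead while-loop (drop content[i] when content[i+1] is also a space) with a one-pass state machine that emits a space only at the start of each space run, and drops the always-true NaN guard and the redundant empty-list check.
import Mathlib
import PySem

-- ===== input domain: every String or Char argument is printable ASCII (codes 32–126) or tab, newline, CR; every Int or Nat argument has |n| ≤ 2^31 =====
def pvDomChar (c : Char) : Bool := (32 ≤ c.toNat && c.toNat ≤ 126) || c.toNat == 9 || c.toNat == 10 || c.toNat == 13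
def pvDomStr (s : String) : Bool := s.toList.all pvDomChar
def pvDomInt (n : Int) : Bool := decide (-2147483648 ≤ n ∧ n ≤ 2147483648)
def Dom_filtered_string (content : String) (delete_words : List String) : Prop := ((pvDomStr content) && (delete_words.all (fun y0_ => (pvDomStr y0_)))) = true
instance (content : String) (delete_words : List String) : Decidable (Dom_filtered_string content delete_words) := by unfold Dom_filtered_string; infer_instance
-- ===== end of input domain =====

-- B replaces A's index/lookahead while-loop (drop a space when the next char is a space)
-- by a one-pass run-based state machine (emit a space only at the start of a space run);
-- objective: simpler, same cost.

-- ===== PORT A =====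
-- A's while-loop over index i, as the obvious structural recursion on the remaining
-- characters: the two-element case is 'i < len-1' (keep content[i] unless content[i]
-- and content[i+1] are both spaces), the singleton case is 'i == len-1' (always keep).
def pvLoopA : List Char → List Char
  | [] => []
  | [c] => [c]
  | c :: d :: rest => if c = ' ' && d = ' ' then pvLoopA (d :: rest) else c :: pvLoopA (d :: rest)

def filtered_string (content : String) (delete_words : List String) : String :=
  -- content != float('nan') is always True in Python; content = str(content) is the identity on str
  let content := if delete_words.isEmpty then content
                 else delete_words.foldl (fun c w => PySem.Str.replace c w "") content
  let content := PySem.Str.strip content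
  String.ofList (pvLoopA content.toList)

-- ===== PORT B =====
-- B's for-loop state: (out so far, prev_space flag)
def pvStepB (st : List Char × Bool) (ch : Char) : List Char × Bool :=
  if ch = ' ' then (if st.2 then st else (st.1 ++ [' '], true))
  else (st.1 ++ [ch], false)

def filtered_string_alt (content : String) (delete_words : List String) : String :=
  let content := delete_words.foldl (fun c w => PySem.Str.replace c w "") content
  let content := PySem.Str.strip content
  String.ofList ((content.toList.foldl pvStepB ([], false)).1)

-- ===== PRECONDITION & SPEC =====
def Spec_filtered_string (content : String) (delete_words : List String) (out : String) : Prop := out = filtered_string_alt content delete_words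
instance (content : String) (delete_words : List String) (out : String) : Decidable (Spec_filtered_string content delete_words out) := by unfold Spec_filtered_string; infer_instance

-- ===== CLAIM (what is proved, stated in full; the proofs are below) =====
def Claim_equal_filtered_string : Prop := ∀ (content : String) (delete_words : List String), Dom_filtered_string content delete_words → Spec_filtered_string content delete_words (filtered_string content delete_words)

-- ===== LEMMAS AND PROOFS =====

-- recursive form of B's fold (proof helper only)
def pvCollB (prev : Bool) : List Char → List Char
  | [] => []
  | c :: rest =>
      if c = ' ' then (if prev then pvCollB true rest else ' ' :: pvCollB true rest)
      else c :: pvCollB false rest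

theorem pvFoldB_eq (cs : List Char) : ∀ (acc : List Char) (prev : Bool),
    (cs.foldl pvStepB (acc, prev)).1 = acc ++ pvCollB prev cs := by
  induction cs with
  | nil => intro acc prev; simp [pvCollB]
  | cons c rest ih =>
      intro acc prev
      by_cases hc : c = ' '
      · cases prev with
        | false => simp [List.foldl, pvStepB, hc, pvCollB, ih]
        | true => simp [List.foldl, pvStepB, hc, pvCollB, ih]
      · simp [List.foldl, pvStepB, hc, pvCollB, ih]

theorem pvLoopA_eq_collB (cs : List Char) : pvLoopA cs = pvCollB false cs := by
  fun_induction pvLoopA cs with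
  | case1 => simp [pvCollB]
  | case2 c => by_cases hc : c = ' ' <;> simp [pvCollB, hc]
  | case3 c d rest h ih =>
      -- both spaces
      simp only [Bool.and_eq_true, decide_eq_true_eq] at h
      simp [pvCollB, h.1, h.2] at ih ⊢
      simpa [pvCollB, h.2] using ih
  | case4 c d rest h ih =>
      by_cases hc : c = ' '
      · have hd : d ≠ ' ' := by
          intro hdd; exact h (by simp [hc, hdd])
        simp [pvCollB, hc, hd, ih]
      · simp [pvCollB, hc, ih]

-- ===== VERDICT (by name: the statement is the Claim_ definition above) =====
theorem filtered_string_spec : Claim_equal_filtered_string := by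
  intro content delete_words _
  unfold Spec_filtered_string filtered_string filtered_string_alt
  have hpre : (if delete_words.isEmpty then content
               else delete_words.foldl (fun c w => PySem.Str.replace c w "") content)
      = delete_words.foldl (fun c w => PySem.Str.replace c w "") content := by
    cases delete_words <;> simp
  simp only [hpre, pvFoldB_eq, pvLoopA_eq_collB, List.nil_append]
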